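-- pv_equiv track=rewrite | github.com/david-t-martel/gterminal-unified-agents | agents/workspace_analyzer_agent.py | _analyze_file_metrics
-- ===== SOURCE A (Python) =====
-- def _analyze_file_metrics(content: str, file_extension: str) -> dict[str, int]:
--     """Analyze metrics for a single file."""
--     lines = content.split("\n")
--
--     metrics = {"loc": 0, "comments": 0, "blank": 0, "functions": 0, "classes": 0}
--
--     for line in lines:
--         stripped = line.strip()
--         if not stripped:
--             metrics["blank"] += 1
--         elif stripped.startswith(("#", "//")):
--             metrics["comments"] += 1
--         else:
--             metrics["loc"] += 1
--
--     # Count functions and classes based on file type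
--     if file_extension == ".py":
--         metrics["functions"] = len([l for l in lines if l.strip().startswith("def ")])
--         metrics["classes"] = len([l for l in lines if l.strip().startswith("class ")])
--     elif file_extension in [".js", ".ts"]:
--         metrics["functions"] = len([l for l in lines if "function" in l])
--         metrics["classes"] = len([l for l in lines if l.strip().startswith("class ")])
--
--     return metrics
-- ===== SOURCE B (Python) =====
-- def _analyze_file_metrics(content: str, file_extension: str) -> dict[str, int]:
--     """Single pass over the lines with plain counters instead of three scans over a dict."""
--     is_py = file_extension == ".py"
--     is_jsts = file_extension in (".js", ".ts")
--     loc = comments = blank = functions = classes = 0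
--     for line in content.split("\n"):
--         stripped = line.strip()
--         if not stripped:
--             blank += 1
--         elif stripped.startswith(("#", "//")):
--             comments += 1
--         else:
--             loc += 1
--         if is_py:
--             if stripped.startswith("def "):
--                 functions += 1
--             if stripped.startswith("class "):
--                 classes += 1
--         elif is_jsts:
--             if "function" in line:
--                 functions += 1
--             if stripped.startswith("class "):
--                 classes += 1
--     return {"loc": loc, "comments": comments, "blank": blank,
--             "functions": functions, "classes": classes}
-- ===== Notes on version B (the rewrite author's own statement) =====
-- stated objective: simpler
-- what changed: B replaces A's dict-mutating classification loop plus three extra list-comprehension scans by a single pass over the lines that maintains five plain integer counters and builds the result dict once at the end.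
import Mathlib
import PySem

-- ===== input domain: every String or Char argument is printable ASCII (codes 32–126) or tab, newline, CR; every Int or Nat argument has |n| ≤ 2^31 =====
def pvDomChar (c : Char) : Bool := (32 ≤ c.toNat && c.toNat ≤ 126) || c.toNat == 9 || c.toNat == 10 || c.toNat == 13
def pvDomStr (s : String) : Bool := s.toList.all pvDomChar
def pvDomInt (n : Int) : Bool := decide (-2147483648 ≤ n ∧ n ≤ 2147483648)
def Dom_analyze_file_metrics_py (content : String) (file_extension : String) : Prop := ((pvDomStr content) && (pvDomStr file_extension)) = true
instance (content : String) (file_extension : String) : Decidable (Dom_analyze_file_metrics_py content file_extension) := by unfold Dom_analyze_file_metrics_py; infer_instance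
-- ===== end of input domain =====

-- B replaces A's dict-mutating loop plus three extra comprehension scans by ONE pass
-- over the lines with five plain counters (objective: simpler; same asymptotic cost).

-- ===== PORT A =====
def analyze_file_metrics_py (content : String) (file_extension : String) : List (String × Int) :=
  let lines := (PySem.Str.split? content "\n").getD []
  let metrics : PySem.Dict String Int :=
    PySem.Dict.ofList [("loc", 0), ("comments", 0), ("blank", 0), ("functions", 0), ("classes", 0)]
  let metrics : PySem.Dict String Int := lines.foldl (fun m line =>
    let stripped := PySem.Str.strip line
    if stripped == "" then m.insert "blank" (m.getD "blank" 0 + 1)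
    else if PySem.Str.startswith stripped "#" || PySem.Str.startswith stripped "//" then
      m.insert "comments" (m.getD "comments" 0 + 1)
    else m.insert "loc" (m.getD "loc" 0 + 1)) metrics
  let metrics : PySem.Dict String Int :=
    if file_extension == ".py" then
      (metrics.insert "functions"
        ((lines.filter (fun l => PySem.Str.startswith (PySem.Str.strip l) "def ")).length : Int)).insert
        "classes" ((lines.filter (fun l => PySem.Str.startswith (PySem.Str.strip l) "class ")).length : Int)
    else if file_extension == ".js" || file_extension == ".ts" then
      (metrics.insert "functions" ((lines.filter (fun l => PySem.Str.isIn "function" l)).length : Int)).insert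
        "classes" ((lines.filter (fun l => PySem.Str.startswith (PySem.Str.strip l) "class ")).length : Int)
    else metrics
  metrics.items

-- ===== PORT B =====
def analyze_file_metrics_py_alt (content : String) (file_extension : String) : List (String × Int) :=
  let is_py := file_extension == ".py"
  let is_jsts := file_extension == ".js" || file_extension == ".ts"
  let st : Int × Int × Int × Int × Int := ((PySem.Str.split? content "\n").getD []).foldl
    (fun (st : Int × Int × Int × Int × Int) line =>
      let (loc, comments, blank, functions, classes) := st
      let stripped := PySem.Str.strip line
      let (loc, comments, blank) :=
        if stripped == "" then (loc, comments, blank + 1)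
        else if PySem.Str.startswith stripped "#" || PySem.Str.startswith stripped "//" then
          (loc, comments + 1, blank)
        else (loc + 1, comments, blank)
      let (functions, classes) :=
        if is_py then
          ((if PySem.Str.startswith stripped "def " then functions + 1 else functions),
           (if PySem.Str.startswith stripped "class " then classes + 1 else classes))
        else if is_jsts then
          ((if PySem.Str.isIn "function" line then functions + 1 else functions),
           (if PySem.Str.startswith stripped "class " then classes + 1 else classes))
        else (functions, classes)
      (loc, comments, blank, functions, classes))
    (0, 0, 0, 0, 0)
  [("loc", st.1), ("comments", st.2.1), ("blank", st.2.2.1),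
   ("functions", st.2.2.2.1), ("classes", st.2.2.2.2)]

-- ===== PRECONDITION & SPEC =====
def Spec_analyze_file_metrics_py (content : String) (file_extension : String) (out : List (String × Int)) : Prop := out = analyze_file_metrics_py_alt content file_extension
instance (content : String) (file_extension : String) (out : List (String × Int)) : Decidable (Spec_analyze_file_metrics_py content file_extension out) := by unfold Spec_analyze_file_metrics_py; infer_instance

-- ===== CLAIM (what is proved, stated in full; the proofs are below) =====
def Claim_equal_analyze_file_metrics_py : Prop := ∀ (content : String) (file_extension : String), Dom_analyze_file_metrics_py content file_extension → Spec_analyze_file_metrics_py content file_extension (analyze_file_metrics_py content file_extension)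

-- ===== LEMMAS AND PROOFS =====

-- Bool line classifiers shared by the two characterisations
def pvIsBlk (l : String) : Bool := PySem.Str.strip l == ""
def pvIsCom (l : String) : Bool :=
  !pvIsBlk l && (PySem.Str.startswith (PySem.Str.strip l) "#" || PySem.Str.startswith (PySem.Str.strip l) "//")
def pvIsLoc (l : String) : Bool :=
  !pvIsBlk l && !(PySem.Str.startswith (PySem.Str.strip l) "#" || PySem.Str.startswith (PySem.Str.strip l) "//")

lemma pvA_step (a b c f g : Int) (h : String) :
    (fun (m : PySem.Dict String Int) line =>
      let stripped := PySem.Str.strip line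
      if stripped == "" then m.insert "blank" (m.getD "blank" 0 + 1)
      else if PySem.Str.startswith stripped "#" || PySem.Str.startswith stripped "//" then
        m.insert "comments" (m.getD "comments" 0 + 1)
      else m.insert "loc" (m.getD "loc" 0 + 1))
      (PySem.Dict.mk [("loc", a), ("comments", b), ("blank", c), ("functions", f), ("classes", g)]) h
    = PySem.Dict.mk [("loc", a + if pvIsLoc h = true then 1 else 0),
        ("comments", b + if pvIsCom h = true then 1 else 0),
        ("blank", c + if pvIsBlk h = true then 1 else 0), ("functions", f), ("classes", g)] := by
  by_cases hB : PySem.Str.strip h == "" <;>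
    by_cases hC : PySem.Str.startswith (PySem.Str.strip h) "#" || PySem.Str.startswith (PySem.Str.strip h) "//" <;>
    simp at hB hC <;>
    simp [hB, hC, pvIsBlk, pvIsCom, pvIsLoc, PySem.Dict.insert, PySem.Dict.getD, PySem.Dict.get?,
      PySem.Dict.contains] <;>
    (try split_ifs) <;> (try simp_all)
  all_goals (rcases hC with hC | hC <;> simp [hC])

set_option maxHeartbeats 1000000 in
lemma pvA_fold (ls : List String) (a b c f g : Int) :
    ls.foldl (fun (m : PySem.Dict String Int) line =>
      let stripped := PySem.Str.strip line
      if stripped == "" then m.insert "blank" (m.getD "blank" 0 + 1)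
      else if PySem.Str.startswith stripped "#" || PySem.Str.startswith stripped "//" then
        m.insert "comments" (m.getD "comments" 0 + 1)
      else m.insert "loc" (m.getD "loc" 0 + 1))
     (PySem.Dict.mk [("loc", a), ("comments", b), ("blank", c), ("functions", f), ("classes", g)])
    = PySem.Dict.mk [("loc", a + (ls.countP pvIsLoc : Int)), ("comments", b + (ls.countP pvIsCom : Int)),
        ("blank", c + (ls.countP pvIsBlk : Int)), ("functions", f), ("classes", g)] := by
  induction ls generalizing a b c with
  | nil => simp
  | cons h t ih =>
    rw [List.foldl_cons]
    refine (congrArg (fun d => List.foldl _ d t) (pvA_step a b c f g h)).trans ?_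
    rw [ih]
    clear ih
    simp only [List.countP_cons, PySem.Dict.mk.injEq, List.cons.injEq, Prod.mk.injEq]
    split_ifs <;> simp only [true_and, and_true] <;> push_cast <;> omega

lemma pvB_step (ispy isjs : Bool) (l c b f g : Int) (h : String) :
    (fun (st : Int × Int × Int × Int × Int) line =>
      let (loc, comments, blank, functions, classes) := st
      let stripped := PySem.Str.strip line
      let (loc, comments, blank) :=
        if stripped == "" then (loc, comments, blank + 1)
        else if PySem.Str.startswith stripped "#" || PySem.Str.startswith stripped "//" then
          (loc, comments + 1, blank)
        else (loc + 1, comments, blank)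
      let (functions, classes) :=
        if ispy then
          ((if PySem.Str.startswith stripped "def " then functions + 1 else functions),
           (if PySem.Str.startswith stripped "class " then classes + 1 else classes))
        else if isjs then
          ((if PySem.Str.isIn "function" line then functions + 1 else functions),
           (if PySem.Str.startswith stripped "class " then classes + 1 else classes))
        else (functions, classes)
      (loc, comments, blank, functions, classes)) (l, c, b, f, g) h
    = (l + (if pvIsLoc h = true then 1 else 0),
       c + (if pvIsCom h = true then 1 else 0),
       b + (if pvIsBlk h = true then 1 else 0),
       f + (if ispy then (if PySem.Str.startswith (PySem.Str.strip h) "def " = true then 1 else 0)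
            else if isjs then (if PySem.Str.isIn "function" h = true then 1 else 0) else 0),
       g + (if (ispy || isjs) = true then
              (if PySem.Str.startswith (PySem.Str.strip h) "class " = true then 1 else 0) else 0)) := by
  cases ispy <;> cases isjs <;>
    by_cases hB : PySem.Str.strip h == "" <;>
    by_cases hC : PySem.Str.startswith (PySem.Str.strip h) "#" || PySem.Str.startswith (PySem.Str.strip h) "//" <;>
    simp at hB hC <;>
    simp [hB, hC, pvIsBlk, pvIsCom, pvIsLoc] <;>
    (try split_ifs) <;> (try simp_all)
  all_goals (rcases hC with hC | hC <;> simp [hC])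

set_option maxHeartbeats 1000000 in
lemma pvB_fold (ispy isjs : Bool) (ls : List String) (l c b f g : Int) :
    ls.foldl (fun (st : Int × Int × Int × Int × Int) line =>
      let (loc, comments, blank, functions, classes) := st
      let stripped := PySem.Str.strip line
      let (loc, comments, blank) :=
        if stripped == "" then (loc, comments, blank + 1)
        else if PySem.Str.startswith stripped "#" || PySem.Str.startswith stripped "//" then
          (loc, comments + 1, blank)
        else (loc + 1, comments, blank)
      let (functions, classes) :=
        if ispy then
          ((if PySem.Str.startswith stripped "def " then functions + 1 else functions),
           (if PySem.Str.startswith stripped "class " then classes + 1 else classes))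
        else if isjs then
          ((if PySem.Str.isIn "function" line then functions + 1 else functions),
           (if PySem.Str.startswith stripped "class " then classes + 1 else classes))
        else (functions, classes)
      (loc, comments, blank, functions, classes)) (l, c, b, f, g)
    = (l + (ls.countP pvIsLoc : Int), c + (ls.countP pvIsCom : Int), b + (ls.countP pvIsBlk : Int),
       f + (if ispy then ((ls.countP (fun x => PySem.Str.startswith (PySem.Str.strip x) "def ") : Int))
            else if isjs then ((ls.countP (fun x => PySem.Str.isIn "function" x) : Int)) else 0),
       g + (if (ispy || isjs) = true then
              ((ls.countP (fun x => PySem.Str.startswith (PySem.Str.strip x) "class ") : Int)) else 0)) := by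
  induction ls generalizing l c b f g with
  | nil => cases ispy <;> cases isjs <;> simp
  | cons h t ih =>
    rw [List.foldl_cons]
    refine (congrArg (fun d => List.foldl _ d t) (pvB_step ispy isjs l c b f g h)).trans ?_
    rw [ih]
    clear ih
    simp only [List.countP_cons, Prod.mk.injEq]
    cases ispy <;> cases isjs <;>
      simp only [Bool.true_or, Bool.false_or, if_true, if_false, Prod.mk.injEq] <;>
      split_ifs <;> (try simp only [true_and, and_true]) <;> (try push_cast) <;> omega

set_option maxHeartbeats 1000000 in
theorem analyze_file_metrics_py_spec : Claim_equal_analyze_file_metrics_py := by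
  intro content file_extension _
  unfold Spec_analyze_file_metrics_py analyze_file_metrics_py analyze_file_metrics_py_alt
  have hofl : PySem.Dict.ofList [("loc", (0:Int)), ("comments", 0), ("blank", 0), ("functions", 0), ("classes", 0)]
      = PySem.Dict.mk [("loc", 0), ("comments", 0), ("blank", 0), ("functions", 0), ("classes", 0)] := by decide
  simp only [hofl]
  rw [pvA_fold, pvB_fold]
  by_cases h1 : (file_extension == ".py") = true
  · simp only [h1, if_true, if_pos]
    simp [PySem.Dict.insert, PySem.Dict.contains, PySem.Dict.items, List.countP_eq_length_filter]
  · by_cases h2 : (file_extension == ".js" || file_extension == ".ts") = true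
    · simp only [h1, h2]
      simp [h1, PySem.Dict.insert, PySem.Dict.contains, PySem.Dict.items, List.countP_eq_length_filter]
    · simp only [h1, h2]
      simp [h1, h2, PySem.Dict.items]
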